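-- pv_equiv track=rewrite | github.com/NoraKyz/Code-PTIT-K5-Python | tong_chu_so_tich_chu_so.py | solve
-- ===== SOURCE A (Python) =====
-- def solve(n):
--     s = sum(n[i] for i in range(0,len(n),2))
--
--     cnt = sum(1 for i in range(1, len(n),2))
--
--     mul = 1
--     for i in range(1, len(n), 2):
--         if n[i] == 0:
--             cnt -= 1
--         else:
--             mul *= n[i]
--
--
--     return s, mul if cnt != 0 else 0
-- ===== SOURCE B (Python) =====
-- def solve(n):
--     s = 0
--     p = None        # None = no nonzero odd-index element seen yet
--     even = True
--     for x in n:
--         if even: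
--             s += x
--         elif x != 0:
--             p = x if p is None else p * x
--         even = not even
--     return s, (0 if p is None else p)
-- ===== Notes on version B (the rewrite author's own statement) =====
-- stated objective: alternative
-- what changed: Replaces A's three separate index-range passes and the counter-decrement trick with one fused pass over the elements, tracking index parity with a toggled flag and representing 'no nonzero odd-index element yet' by an Optional product accumulator (None -> 0 at the end).
import Mathlib
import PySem

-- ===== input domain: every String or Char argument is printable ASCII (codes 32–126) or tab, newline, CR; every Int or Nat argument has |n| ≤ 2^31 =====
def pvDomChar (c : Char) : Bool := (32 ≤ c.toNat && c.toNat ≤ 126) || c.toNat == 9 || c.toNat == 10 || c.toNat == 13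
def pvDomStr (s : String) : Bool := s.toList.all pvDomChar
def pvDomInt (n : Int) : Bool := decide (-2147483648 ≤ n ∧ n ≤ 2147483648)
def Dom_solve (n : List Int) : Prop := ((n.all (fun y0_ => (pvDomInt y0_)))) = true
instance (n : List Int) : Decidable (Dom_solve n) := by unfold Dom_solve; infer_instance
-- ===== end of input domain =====

-- B replaces A's three index-range passes and its counter-decrement zero detection with a
-- single fused pass over the elements: a toggled parity flag and an Optional product
-- accumulator (none = no nonzero odd-index element yet).  Objective: alternative.

-- ===== PORT A =====
def solve (n : List Int) : Int × Int :=
  -- s = sum(n[i] for i in range(0, len(n), 2))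
  let s : Int := ((PySem.List.pyRange 0 (n.length : Int) 2).map
      (fun i => PySem.List.pyGetD n i 0)).sum
  -- cnt = sum(1 for i in range(1, len(n), 2))
  let cnt : Int := ((PySem.List.pyRange 1 (n.length : Int) 2).map
      (fun _ => (1 : Int))).sum
  -- for i in range(1, len(n), 2): if n[i] == 0: cnt -= 1 else: mul *= n[i]
  let st : Int × Int := (PySem.List.pyRange 1 (n.length : Int) 2).foldl
      (fun (st : Int × Int) i =>
        if PySem.List.pyGetD n i 0 == 0 then (st.1 - 1, st.2)
        else (st.1, st.2 * PySem.List.pyGetD n i 0)) (cnt, 1)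
  (s, if st.1 ≠ 0 then st.2 else 0)

-- ===== PORT B =====
-- the loop body of Source B: state (s, p, even); 'p = x if p is None else p * x' is p.getD 1 * x
def bstep (st : Int × Option Int × Bool) (x : Int) : Int × Option Int × Bool :=
  if st.2.2 then (st.1 + x, st.2.1, false)
  else if x != 0 then (st.1, some (st.2.1.getD 1 * x), true)
  else (st.1, st.2.1, true)

def solve_alt (n : List Int) : Int × Int :=
  let st := n.foldl bstep (0, none, true)
  (st.1, st.2.1.getD 0)

-- ===== PRECONDITION & SPEC =====
def Spec_solve (n : List Int) (out : Int × Int) : Prop := out = solve_alt n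
instance (n : List Int) (out : Int × Int) : Decidable (Spec_solve n out) := by unfold Spec_solve; infer_instance

-- ===== CLAIM (what is proved, stated in full; the proofs are below) =====
def Claim_equal_solve : Prop := ∀ (n : List Int), Dom_solve n → Spec_solve n (solve n)

-- ===== LEMMAS AND PROOFS =====

-- evens/odds of a list in one recursion: skim xs = (elements at even indices, elements at odd indices)
def skim : List Int → List Int × List Int
  | [] => ([], [])
  | x :: t => ((x :: (skim t).2, (skim t).1))

theorem skim_getD (xs : List Int) :
    (List.range ((xs.length + 1) / 2)).map (fun k => xs.getD (2 * k) 0) = (skim xs).1 ∧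
    (List.range (xs.length / 2)).map (fun k => xs.getD (2 * k + 1) 0) = (skim xs).2 := by
  induction xs with
  | nil => simp [skim]
  | cons x t ih =>
    obtain ⟨ih1, ih2⟩ := ih
    constructor
    · have hc : ((x :: t).length + 1) / 2 = t.length / 2 + 1 := by
        simp only [List.length_cons]; omega
      rw [hc, List.range_succ_eq_map, List.map_cons, List.map_map]
      simp only [skim]
      refine congrArg (x :: ·) ?_
      rw [← ih2]
      apply List.map_congr_left
      intro k _
      simp only [Function.comp, Nat.succ_eq_add_one,
        show ∀ k, 2 * (k + 1) = (2 * k + 1) + 1 from fun k => by ring, List.getD_cons_succ]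
    · have hc : (x :: t).length / 2 = (t.length + 1) / 2 := by
        simp only [List.length_cons]
      rw [hc]
      simp only [skim]
      rw [← ih1]
      apply List.map_congr_left
      intro k _
      simp only [List.getD_cons_succ]

-- A's even-index range-map is (skim n).1
theorem mapA_evens (n : List Int) :
    (PySem.List.pyRange 0 (n.length : Int) 2).map (fun i => PySem.List.pyGetD n i 0)
      = (skim n).1 := by
  rw [PySem.List.pyRange_of_pos 0 (n.length : Int) (by norm_num), List.map_map]
  have hcnt : (if (0:Int) < (n.length : Int) then
      (((n.length : Int) - 0 + 2 - 1) / 2).toNat else 0) = (n.length + 1) / 2 := by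
    split_ifs with h
    · omega
    · omega
  rw [hcnt, ← (skim_getD n).1]
  apply List.map_congr_left
  intro k _
  simp only [Function.comp]
  have h2 : (0 : Int) + 2 * (k : Int) = ((2 * k : Nat) : Int) := by push_cast; ring
  rw [h2, PySem.List.pyGetD_natCast]

-- A's odd-index range-map is (skim n).2
theorem mapA_odds (n : List Int) :
    (PySem.List.pyRange 1 (n.length : Int) 2).map (fun i => PySem.List.pyGetD n i 0)
      = (skim n).2 := by
  rw [PySem.List.pyRange_of_pos 1 (n.length : Int) (by norm_num), List.map_map]
  have hcnt : (if (1:Int) < (n.length : Int) then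
      (((n.length : Int) - 1 + 2 - 1) / 2).toNat else 0) = n.length / 2 := by
    split_ifs with h
    · omega
    · omega
  rw [hcnt, ← (skim_getD n).2]
  apply List.map_congr_left
  intro k _
  simp only [Function.comp]
  have h2 : (1 : Int) + 2 * (k : Int) = ((2 * k + 1 : Nat) : Int) := by push_cast; ring
  rw [h2, PySem.List.pyGetD_natCast]

-- A's loop over the odd elements: counter loses one per zero, mul accumulates nonzeros
theorem foldA_loop (o : List Int) : ∀ (c m : Int),
    o.foldl (fun (st : Int × Int) x =>
        if x == 0 then (st.1 - 1, st.2) else (st.1, st.2 * x)) (c, m)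
      = (c - (o.countP (fun x => x == 0) : Int),
         (o.filter (fun x => x != 0)).foldl (fun p x => p * x) m) := by
  induction o with
  | nil => intro c m; simp
  | cons x t ih =>
    intro c m
    by_cases hx : x = 0
    · subst hx
      simp only [List.foldl_cons, List.countP_cons, List.filter_cons, beq_self_eq_true,
        if_true, bne_self_eq_false]
      rw [ih]
      refine Prod.ext ?_ rfl
      push_cast
      ring
    · have h0 : ((x == 0) : Bool) = false := by simp [hx]
      have h1 : ((x != 0) : Bool) = true := by simp [hx]
      simp only [List.foldl_cons, List.countP_cons, List.filter_cons, h0, h1, ite_true]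
      rw [ih]
      simp

-- A's third loop re-expressed as a fold over the odd elements themselves
theorem foldA_range (n : List Int) (c : Int) :
    (PySem.List.pyRange 1 (n.length : Int) 2).foldl
        (fun (st : Int × Int) i =>
          if PySem.List.pyGetD n i 0 == 0 then (st.1 - 1, st.2)
          else (st.1, st.2 * PySem.List.pyGetD n i 0)) (c, 1)
      = ((skim n).2).foldl (fun (st : Int × Int) x =>
          if x == 0 then (st.1 - 1, st.2) else (st.1, st.2 * x)) (c, 1) := by
  conv_rhs => rw [← mapA_odds n]
  rw [List.foldl_map]

theorem cntA_eq (n : List Int) :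
    ((PySem.List.pyRange 1 (n.length : Int) 2).map (fun _ => (1 : Int))).sum
      = ((skim n).2.length : Int) := by
  rw [PySem.List.sum_map_const_int]
  have h := congrArg List.length (mapA_odds n)
  simp only [List.length_map] at h
  rw [h, mul_one]

-- the Optional-product step of B, on a list
def optAcc (p : Option Int) (l : List Int) : Option Int :=
  l.foldl (fun q x => some (q.getD 1 * x)) p

-- B's fused pass, characterised against skim (both parity phases at once)
theorem foldB_skim (xs : List Int) : ∀ (s : Int) (p : Option Int),
    xs.foldl bstep (s, p, true)
      = (s + (skim xs).1.sum, optAcc p ((skim xs).2.filter (fun x => x != 0)),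
         decide (xs.length % 2 = 0)) ∧
    xs.foldl bstep (s, p, false)
      = (s + (skim xs).2.sum, optAcc p ((skim xs).1.filter (fun x => x != 0)),
         decide (xs.length % 2 = 1)) := by
  induction xs with
  | nil => intro s p; simp [optAcc, skim]
  | cons x t ih =>
    intro s p
    constructor
    · have hb : bstep (s, p, true) x = (s + x, p, false) := by simp [bstep]
      rw [List.foldl_cons, hb, (ih (s + x) p).2]
      simp only [skim]
      refine Prod.ext (by simp only [List.sum_cons]; ring) (Prod.ext rfl ?_)
      simp only [List.length_cons]
      by_cases hp : t.length % 2 = 1 <;> simp [hp] <;> omega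
    · by_cases hx : x = 0
      · subst hx
        have hb : bstep (s, p, false) (0 : Int) = (s, p, true) := by simp [bstep]
        rw [List.foldl_cons, hb, (ih s p).1]
        simp only [skim, List.filter_cons, bne_self_eq_false]
        refine Prod.ext rfl (Prod.ext rfl ?_)
        simp only [List.length_cons]
        by_cases hp : t.length % 2 = 0 <;> simp [hp] <;> omega
      · have hxb : ((x != 0) : Bool) = true := by simp [hx]
        have hb : bstep (s, p, false) x = (s, some (p.getD 1 * x), true) := by
          simp [bstep, hxb]
        rw [List.foldl_cons, hb, (ih s (some (p.getD 1 * x))).1]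
        simp only [skim, List.filter_cons, hxb, ite_true]
        refine Prod.ext rfl (Prod.ext ?_ ?_)
        · simp [optAcc]
        · simp only [List.length_cons]
          by_cases hp : t.length % 2 = 0 <;> simp [hp] <;> omega

theorem optAcc_some (l : List Int) : ∀ m : Int,
    optAcc (some m) l = some (l.foldl (fun p x => p * x) m) := by
  induction l with
  | nil => intro m; rfl
  | cons x t ih => intro m; simp only [optAcc, List.foldl_cons] at *; simpa using ih (m * x)

theorem optAcc_none_getD (l : List Int) :
    (optAcc none l).getD 0 = if l.isEmpty then 0 else l.foldl (fun p x => p * x) 1 := by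
  cases l with
  | nil => rfl
  | cons x t =>
    have h1 : optAcc none (x :: t) = optAcc (some (1 * x)) t := by simp [optAcc]
    rw [h1, optAcc_some]
    simp

-- ===== VERDICT (by name: the statement is the Claim_ definition above) =====
theorem solve_spec : Claim_equal_solve := by
  intro n _
  unfold Spec_solve solve solve_alt
  rw [(foldB_skim n 0 none).1]
  simp only [mapA_evens, cntA_eq, foldA_range, foldA_loop, zero_add, optAcc_none_getD]
  set o := (skim n).2 with ho
  have hcAll : o.countP (fun x => x == 0) + o.countP (fun x => x != 0) = o.length := by
    induction o with
    | nil => simp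
    | cons x t ih => by_cases hx : x = 0 <;> simp [hx] <;> omega
  have hcond : ((o.length : Int) - (o.countP (fun x => x == 0) : Int) ≠ 0)
      ↔ ¬ (o.filter (fun x => x != 0)).isEmpty := by
    rw [List.isEmpty_iff, ← List.length_eq_zero_iff, ← List.countP_eq_length_filter]
    constructor
    · intro h h'; omega
    · intro h; omega
  by_cases hemp : (o.filter (fun x => x != 0)).isEmpty
  · have h2 : ¬ ((o.length : Int) - (o.countP (fun x => x == 0) : Int) ≠ 0) := by
      rw [hcond]; exact fun h => h hemp
    rw [if_neg h2, if_pos hemp]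
  · have h2 : (o.length : Int) - (o.countP (fun x => x == 0) : Int) ≠ 0 := hcond.mpr hemp
    rw [if_pos h2, if_neg hemp]
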